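-- pv_equiv track=rewrite | github.com/NMIL230/nmil-p-mc-ai-man02 | src/utils/reporting/formatting.py | _count_sigfigs
-- ===== SOURCE A (Python) =====
-- def _count_sigfigs(text: str) -> int:
--     main = text.split("e")[0].split("E")[0]
--     digits = 0
--     seen_non_zero = False
--     for ch in main:
--         if ch.isdigit():
--             if ch != "0" or seen_non_zero:
--                 digits += 1
--                 seen_non_zero = True
--             elif seen_non_zero:
--                 digits += 1
--     return digits
-- ===== SOURCE B (Python) =====
-- def _count_sigfigs(text: str) -> int:
--     main = text.split("e")[0].split("E")[0]
--     digits = "".join(ch for ch in main if ch.isdigit())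
--     return len(digits.lstrip("0"))
-- ===== Notes on version B (the rewrite author's own statement) =====
-- stated objective: simpler
-- what changed: Replaces the stateful one-pass flag machine (seen_non_zero, with a dead elif branch) by a two-phase extract-then-strip computation: collect the digit characters, strip leading zeros, return the length.
import Mathlib
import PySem

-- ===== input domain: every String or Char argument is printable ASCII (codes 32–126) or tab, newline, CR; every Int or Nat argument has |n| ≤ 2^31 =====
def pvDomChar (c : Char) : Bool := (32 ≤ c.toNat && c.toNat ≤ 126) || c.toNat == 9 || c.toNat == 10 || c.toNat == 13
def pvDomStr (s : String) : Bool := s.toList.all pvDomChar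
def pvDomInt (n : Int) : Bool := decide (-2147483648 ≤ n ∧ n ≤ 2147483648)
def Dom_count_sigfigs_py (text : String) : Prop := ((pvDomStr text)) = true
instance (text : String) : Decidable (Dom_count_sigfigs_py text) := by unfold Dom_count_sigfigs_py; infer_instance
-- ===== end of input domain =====

-- B replaces A's stateful seen_non_zero flag loop by extract-digits-then-strip-leading-zeros; objective: simpler.

-- ===== PORT A =====
-- main = text.split("e")[0].split("E")[0]
def pvMain_count_sigfigs (text : String) : List Char :=
  ((PySem.Chars.splitOn ((PySem.Chars.splitOn text.toList ['e']).getD 0 []) ['E']).getD 0 [])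

-- the loop body of A: state (digits, seen_non_zero)
def pvStepA (st : Int × Bool) (ch : Char) : Int × Bool :=
  if PySem.Chars.isdigit ch then
    if ch ≠ '0' ∨ st.2 then (st.1 + 1, true)
    else if st.2 then (st.1 + 1, st.2)   -- A's dead 'elif seen_non_zero' branch, kept literally
    else st
  else st

def count_sigfigs_py (text : String) : Int :=
  ((pvMain_count_sigfigs text).foldl pvStepA (0, false)).1

-- ===== PORT B =====
def count_sigfigs_py_alt (text : String) : Int :=
  let main := pvMain_count_sigfigs text
  let digits := main.filter PySem.Chars.isdigit       -- ''.join(ch for ch in main if ch.isdigit())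
  ((digits.dropWhile (fun c => c == '0')).length : Int)  -- len(digits.lstrip('0')); lstrip("0") drops leading '0' chars exactly

-- ===== PRECONDITION & SPEC =====
def Spec_count_sigfigs_py (text : String) (out : Int) : Prop := out = count_sigfigs_py_alt text
instance (text : String) (out : Int) : Decidable (Spec_count_sigfigs_py text out) := by unfold Spec_count_sigfigs_py; infer_instance

-- ===== CLAIM (what is proved, stated in full; the proofs are below) =====
def Claim_equal_count_sigfigs_py : Prop := ∀ (text : String), Dom_count_sigfigs_py text → Spec_count_sigfigs_py text (count_sigfigs_py text)

-- ===== LEMMAS AND PROOFS =====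

-- loop invariant: A's fold equals d plus (all digits yet to come, if seen) / (digits after leading zeros, if not)
theorem pvFoldA_eq (cs : List Char) : ∀ (d : Int) (seen : Bool),
    (cs.foldl pvStepA (d, seen)).1 =
      d + (if seen then ((cs.filter PySem.Chars.isdigit).length : Int)
           else (((cs.filter PySem.Chars.isdigit).dropWhile (fun c => c == '0')).length : Int)) := by
  induction cs with
  | nil => intro d seen; cases seen <;> simp
  | cons ch rest ih =>
    intro d seen
    by_cases hd : PySem.Chars.isdigit ch = true
    · by_cases h0 : ch = '0'
      · subst h0
        cases seen with
        | false =>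
          simp [pvStepA, hd, ih]
        | true =>
          simp [pvStepA, hd, ih]
          ring
      · cases seen <;> simp [pvStepA, hd, h0, ih] <;> first
          | ring
          | skip
    · simp only [List.foldl_cons, pvStepA, hd, if_neg hd]
      rw [ih]
      simp [hd]

-- ===== VERDICT (by name: the statement is the Claim_ definition above) =====
theorem count_sigfigs_py_spec : Claim_equal_count_sigfigs_py := by
  intro text _
  unfold Spec_count_sigfigs_py count_sigfigs_py count_sigfigs_py_alt
  rw [pvFoldA_eq]
  simp
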